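-- pv_equiv track=rewrite | github.com/DCAN-Labs/hbcd-docs | code/create-nmind-badge.py | count_category_tier_bools
-- ===== SOURCE A (Python) =====
-- from typing import Any
--
-- CategoryCounts = dict[str, dict[str, tuple[int, int]]]
--
-- def count_category_tier_bools(obj: Any) -> CategoryCounts:
--     """Count number of trues and falses by tier and category."""
--     return {
--         category: {
--             tier: (
--                 sum(
--                     val is True for val in obj.get(category, {}).get(tier, {}).values()
--                 ),
--                 sum(
--                     val is False for val in obj.get(category, {}).get(tier, {}).values()
--                 ),
--             )
--             for tier in ("bronze", "silver", "gold")
--         }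
--         for category in ("documentation", "infrastructure", "testing")
--     }
-- ===== SOURCE B (Python) =====
-- def count_category_tier_bools(obj):
--     """Count trues/falses by tier and category via one global sweep of the data.
--
--     Instead of probing each of the 9 (category, tier) cells and scanning it,
--     walk the input once, tallying (category, tier, value) triples into a single
--     counter dict, then assemble the fixed-shape grid by counter lookups.
--     """
--     CATS = ("documentation", "infrastructure", "testing")
--     TIERS = ("bronze", "silver", "gold")
--     counts = {}
--     for category, tiers in obj.items():
--         if category in CATS:
--             for tier, vals in tiers.items():
--                 if tier in TIERS:
--                     for v in vals.values():
--                         if v is True or v is False: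
--                             key = (category, tier, v)
--                             counts[key] = counts.get(key, 0) + 1
--     return {
--         category: {
--             tier: (counts.get((category, tier, True), 0),
--                    counts.get((category, tier, False), 0))
--             for tier in TIERS
--         }
--         for category in CATS
--     }
-- ===== Notes on version B (the rewrite author's own statement) =====
-- stated objective: alternative
-- what changed: B inverts the traversal: instead of A probing each of the 9 (category, tier) cells with a double dict lookup and two sum-comprehension scans, B sweeps the input data once, tallying (category, tier, value) triples into a single counter dict, and then assembles the fixed 3x3 grid purely by counter lookups.
import Mathlib
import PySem

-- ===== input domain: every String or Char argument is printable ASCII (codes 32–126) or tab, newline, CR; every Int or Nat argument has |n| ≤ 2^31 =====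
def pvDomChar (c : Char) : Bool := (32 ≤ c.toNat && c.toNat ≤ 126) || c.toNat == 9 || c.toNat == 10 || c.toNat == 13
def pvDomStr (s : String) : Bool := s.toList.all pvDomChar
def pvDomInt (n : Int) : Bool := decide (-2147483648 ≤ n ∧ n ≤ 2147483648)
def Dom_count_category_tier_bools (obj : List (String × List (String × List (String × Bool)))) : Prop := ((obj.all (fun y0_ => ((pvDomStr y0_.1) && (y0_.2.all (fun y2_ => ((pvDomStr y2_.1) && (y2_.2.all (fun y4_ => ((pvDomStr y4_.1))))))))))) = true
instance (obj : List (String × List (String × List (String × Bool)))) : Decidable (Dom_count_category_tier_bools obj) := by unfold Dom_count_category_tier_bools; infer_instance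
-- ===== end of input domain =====

-- B replaces A's 9 per-cell double-lookup-and-two-scan probes by ONE global sweep of the data
-- tallying (category, tier, value) triples into a single counter dict, then reads the grid from it.

-- ===== PORT A =====
-- {category: {tier: (sum(val is True ...), sum(val is False ...)) for tier in ...} for category in ...}
def count_category_tier_bools (obj : List (String × List (String × List (String × Bool)))) : List (String × List (String × Int × Int)) :=
  ["documentation", "infrastructure", "testing"].map (fun category =>
    (category, ["bronze", "silver", "gold"].map (fun tier =>
      (tier,
        ((PySem.Dict.values (PySem.Dict.mk ((PySem.Dict.mk ((PySem.Dict.mk obj).getD category [])).getD tier []))).map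
          (fun v => if v = true then (1 : Int) else 0)).sum,
        ((PySem.Dict.values (PySem.Dict.mk ((PySem.Dict.mk ((PySem.Dict.mk obj).getD category [])).getD tier []))).map
          (fun v => if v = false then (1 : Int) else 0)).sum))))

-- ===== PORT B =====
-- one sweep over obj.items() tallying (category, tier, value) into a counter, then 9 counter lookups
def count_category_tier_bools_alt (obj : List (String × List (String × List (String × Bool)))) : List (String × List (String × Int × Int)) :=
  let counts : PySem.Dict (String × String × Bool) Int :=
    obj.foldl (fun cnts pcat =>
      if ["documentation", "infrastructure", "testing"].contains pcat.1 then
        pcat.2.foldl (fun cnts ptier =>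
          if ["bronze", "silver", "gold"].contains ptier.1 then
            ptier.2.foldl (fun cnts pv =>
              if pv.2 == true || pv.2 == false then
                cnts.modify (pcat.1, ptier.1, pv.2) 0 (· + 1)
              else cnts) cnts
          else cnts) cnts
      else cnts) PySem.Dict.empty
  ["documentation", "infrastructure", "testing"].map (fun category =>
    (category, ["bronze", "silver", "gold"].map (fun tier =>
      (tier, counts.getD (category, tier, true) 0, counts.getD (category, tier, false) 0))))

-- ===== PRECONDITION & SPEC =====
-- Pre_ excludes association lists with duplicate keys at the category or tier level: such lists do
-- not represent any Python dict (A and B both take a dict), and there A's first-match lookup vs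
-- B's sweep over all entries is an artefact of the list encoding, not of either Python program.
def Pre_count_category_tier_bools (obj : List (String × List (String × List (String × Bool)))) : Prop :=
  (obj.map Prod.fst).Nodup ∧ ∀ p ∈ obj, (p.2.map Prod.fst).Nodup
instance (obj : List (String × List (String × List (String × Bool)))) : Decidable (Pre_count_category_tier_bools obj) := by unfold Pre_count_category_tier_bools; infer_instance

def pvWitness_count_category_tier_bools : (List (String × List (String × List (String × Bool)))) :=
  [("documentation", [("bronze", [("a", true), ("b", false)]), ("gold", [("c", true)])]),
   ("testing", [("silver", [("d", false)])])]

def Spec_count_category_tier_bools (obj : List (String × List (String × List (String × Bool)))) (out : List (String × List (String × Int × Int))) : Prop := out = count_category_tier_bools_alt obj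
instance (obj : List (String × List (String × List (String × Bool)))) (out : List (String × List (String × Int × Int))) : Decidable (Spec_count_category_tier_bools obj out) := by unfold Spec_count_category_tier_bools; infer_instance

-- ===== CLAIM (what is proved, stated in full; the proofs are below) =====
def Claim_equal_count_category_tier_bools : Prop := ∀ (obj : List (String × List (String × List (String × Bool)))), Dom_count_category_tier_bools obj → Pre_count_category_tier_bools obj → Spec_count_category_tier_bools obj (count_category_tier_bools obj)

-- ===== LEMMAS AND PROOFS =====

theorem innerFold_getD (c t : String) (vals : List (String × Bool))
    (d : PySem.Dict (String × String × Bool) Int) (q : String × String × Bool) :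
    (vals.foldl (fun cnts pv =>
        if pv.2 == true || pv.2 == false then cnts.modify (c, t, pv.2) 0 (· + 1) else cnts) d).getD q 0
      = d.getD q 0 + ((vals.map (fun p => (c, t, p.2))).count q : Int) := by
  induction vals generalizing d with
  | nil => simp
  | cons p ps ih =>
    have hg : (p.2 == true || p.2 == false) = true := by cases p.2 <;> simp
    rw [List.foldl_cons, List.map_cons, List.count_cons]
    simp only [hg, if_true]
    rw [ih, PySem.Dict.getD_modify]
    by_cases hq : q = (c, t, p.2)
    · simp [hq]; ring
    · simp [hq, Ne.symm hq]

theorem count_triples (c t : String) (vs : List (String × Bool)) (b₀ : Bool) :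
    (vs.map (fun pv => (c, t, pv.2))).count (c, t, b₀) = (vs.map Prod.snd).count b₀ := by
  induction vs with
  | nil => simp
  | cons x xs ihx =>
    rw [List.map_cons, List.map_cons, List.count_cons, List.count_cons, ihx]
    by_cases hxb : x.2 = b₀ <;> simp [hxb]

theorem count_triples_ne (c t : String) (vs : List (String × Bool)) (q : String × String × Bool)
    (hq : q.1 ≠ c ∨ q.2.1 ≠ t) :
    (vs.map (fun pv => (c, t, pv.2))).count q = 0 := by
  rw [List.count_eq_zero]
  intro h
  rcases List.mem_map.mp h with ⟨x, _, hx⟩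
  rcases hq with h1 | h1 <;> rw [← hx] at h1 <;> exact h1 rfl

theorem midFold_getD (c : String) (tiers : List (String × List (String × Bool)))
    (hnd : (tiers.map Prod.fst).Nodup)
    (d : PySem.Dict (String × String × Bool) Int) (c₀ t₀ : String) (b₀ : Bool)
    (ht₀ : ["bronze", "silver", "gold"].contains t₀ = true) :
    (tiers.foldl (fun cnts ptier =>
        if ["bronze", "silver", "gold"].contains ptier.1 then
          ptier.2.foldl (fun cnts pv =>
            if pv.2 == true || pv.2 == false then cnts.modify (c, ptier.1, pv.2) 0 (· + 1) else cnts) cnts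
        else cnts) d).getD (c₀, t₀, b₀) 0
      = d.getD (c₀, t₀, b₀) 0 +
        (if c = c₀ then ((((PySem.Dict.mk tiers).getD t₀ []).map Prod.snd).count b₀ : Int) else 0) := by
  induction tiers generalizing d with
  | nil => simp [PySem.Dict.getD_eq_get?_getD, PySem.Dict.get?]
  | cons p ps ih =>
    rcases p with ⟨pt, pvs⟩
    rw [List.map_cons] at hnd
    have hnd' := hnd.of_cons
    have hmem : pt ∉ ps.map Prod.fst := (List.nodup_cons.mp hnd).1
    have hchain : (PySem.Dict.mk ((pt, pvs) :: ps)).getD t₀ [] =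
        if pt = t₀ then pvs else (PySem.Dict.mk ps).getD t₀ [] := by
      rw [PySem.Dict.getD_eq_get?_getD, PySem.Dict.get?_mk_cons]
      by_cases h : pt = t₀ <;> simp [h, PySem.Dict.getD_eq_get?_getD]
    rw [List.foldl_cons]
    by_cases hg : ["bronze", "silver", "gold"].contains pt = true
    · simp only [if_pos hg]
      rw [ih hnd', innerFold_getD, hchain]
      by_cases ht : pt = t₀
      · have hrest : (PySem.Dict.mk ps).contains t₀ = false := by
          rw [PySem.Dict.contains_mk]
          simp only [List.any_eq_false]
          intro x hx hx1
          exact hmem (ht ▸ (eq_of_beq hx1) ▸ List.mem_map_of_mem hx)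
        rw [PySem.Dict.getD_of_not_contains _ _ hrest, if_pos ht]
        by_cases hc : c = c₀
        · subst hc; subst ht
          rw [count_triples, if_pos rfl, if_pos rfl]
          norm_num
        · rw [count_triples_ne c pt pvs _ (Or.inl (Ne.symm hc)), if_neg hc, if_neg hc]
          simp
      · rw [if_neg ht, count_triples_ne c pt pvs _ (Or.inr (Ne.symm ht))]
        simp
    · rw [if_neg hg]
      rw [ih hnd' d, hchain]
      have ht : pt ≠ t₀ := fun h => hg (h ▸ ht₀)
      rw [if_neg ht]

theorem outerFold_getD (obj : List (String × List (String × List (String × Bool))))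
    (hnd : (obj.map Prod.fst).Nodup) (hin : ∀ p ∈ obj, (p.2.map Prod.fst).Nodup)
    (d : PySem.Dict (String × String × Bool) Int) (c₀ t₀ : String) (b₀ : Bool)
    (hc₀ : ["documentation", "infrastructure", "testing"].contains c₀ = true)
    (ht₀ : ["bronze", "silver", "gold"].contains t₀ = true) :
    (obj.foldl (fun cnts pcat =>
        if ["documentation", "infrastructure", "testing"].contains pcat.1 then
          pcat.2.foldl (fun cnts ptier =>
            if ["bronze", "silver", "gold"].contains ptier.1 then
              ptier.2.foldl (fun cnts pv =>
                if pv.2 == true || pv.2 == false then cnts.modify (pcat.1, ptier.1, pv.2) 0 (· + 1) else cnts) cnts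
            else cnts) cnts
        else cnts) d).getD (c₀, t₀, b₀) 0
      = d.getD (c₀, t₀, b₀) 0 +
        ((((PySem.Dict.mk ((PySem.Dict.mk obj).getD c₀ [])).getD t₀ []).map Prod.snd).count b₀ : Int) := by
  induction obj generalizing d with
  | nil => simp [PySem.Dict.getD_eq_get?_getD, PySem.Dict.get?]
  | cons p ps ih =>
    rcases p with ⟨ct, tiers⟩
    rw [List.map_cons] at hnd
    have hnd' := hnd.of_cons
    have hmem : ct ∉ ps.map Prod.fst := (List.nodup_cons.mp hnd).1
    have hin' : ∀ p ∈ ps, (p.2.map Prod.fst).Nodup := fun p hp => hin p (List.mem_cons_of_mem _ hp)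
    have htiers : (tiers.map Prod.fst).Nodup := hin (ct, tiers) List.mem_cons_self
    have hchain : (PySem.Dict.mk ((ct, tiers) :: ps)).getD c₀ [] =
        if ct = c₀ then tiers else (PySem.Dict.mk ps).getD c₀ [] := by
      rw [PySem.Dict.getD_eq_get?_getD, PySem.Dict.get?_mk_cons]
      by_cases h : ct = c₀ <;> simp [h, PySem.Dict.getD_eq_get?_getD]
    rw [List.foldl_cons]
    by_cases hg : ["documentation", "infrastructure", "testing"].contains ct = true
    · rw [if_pos hg, ih hnd' hin', midFold_getD ct tiers htiers _ c₀ t₀ b₀ ht₀, hchain]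
      by_cases hc : ct = c₀
      · have hrest : (PySem.Dict.mk ps).contains c₀ = false := by
          rw [PySem.Dict.contains_mk]
          simp only [List.any_eq_false]
          intro x hx hx1
          exact hmem (hc ▸ (eq_of_beq hx1) ▸ List.mem_map_of_mem hx)
        rw [PySem.Dict.getD_of_not_contains _ _ hrest, if_pos hc, if_pos hc]
        simp [PySem.Dict.getD_eq_get?_getD, PySem.Dict.get?]
      · rw [if_neg hc, if_neg hc]
        ring
    · rw [if_neg hg, ih hnd' hin' d, hchain]
      have hc : ct ≠ c₀ := fun h => hg (h ▸ hc₀)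
      rw [if_neg hc]

theorem cell_sum_eq_count (vals : List (String × Bool)) (b : Bool) :
    (((PySem.Dict.values (PySem.Dict.mk vals)).map (fun v => if v = b then (1 : Int) else 0)).sum)
      = ((vals.map Prod.snd).count b : Int) := by
  rw [PySem.Dict.values_mk]
  have : (fun v => if v = b then (1 : Int) else 0) = (fun v => if (v == b) = true then (1 : Int) else 0) := by
    funext v; by_cases h : v = b <;> simp [h]
  rw [this, PySem.List.sum_map_ite_one_zero]
  congr 1

-- ===== VERDICT (by name: the statement is the Claim_ definition above) =====
theorem count_category_tier_bools_spec : Claim_equal_count_category_tier_bools := by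
  intro obj _ hpre
  obtain ⟨h1, h2⟩ := hpre
  unfold Spec_count_category_tier_bools count_category_tier_bools count_category_tier_bools_alt
  have key : ∀ (c t : String) (b : Bool),
      ["documentation", "infrastructure", "testing"].contains c = true →
      ["bronze", "silver", "gold"].contains t = true →
      (obj.foldl (fun cnts pcat =>
        if ["documentation", "infrastructure", "testing"].contains pcat.1 then
          pcat.2.foldl (fun cnts ptier =>
            if ["bronze", "silver", "gold"].contains ptier.1 then
              ptier.2.foldl (fun cnts pv =>
                if pv.2 == true || pv.2 == false then cnts.modify (pcat.1, ptier.1, pv.2) 0 (· + 1) else cnts) cnts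
            else cnts) cnts
        else cnts) PySem.Dict.empty).getD (c, t, b) 0
      = ((((PySem.Dict.mk ((PySem.Dict.mk obj).getD c [])).getD t []).map Prod.snd).count b : Int) := by
    intro c t b hc ht
    rw [outerFold_getD obj h1 h2 _ c t b hc ht]
    simp [PySem.Dict.getD_empty]
  simp only [List.map_cons, List.map_nil, List.cons.injEq, Prod.mk.injEq, and_true, true_and]
  repeat' apply And.intro
  all_goals rw [cell_sum_eq_count, key _ _ _ (by decide) (by decide)]
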